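-- pv_equiv track=rewrite | github.com/binarybottle/keyboard_layout_scorers | test_io.py | convert_to_qwerty_order
-- ===== SOURCE A (Python) =====
-- QWERTY_POSITIONS = "QWERTYUIOPASDFGHJKL;ZXCVBNM,./['"
--
-- def convert_to_qwerty_order(items: str, positions: str) -> str:
--     """Convert items+positions (MOO format) to layout_qwerty format."""
--     # Create mapping from position to item
--     pos_to_item = dict(zip(positions.upper(), items.upper()))
--
--     # Build layout string in QWERTY order
--     layout_chars = []
--     for qwerty_pos in QWERTY_POSITIONS:
--         if qwerty_pos in pos_to_item:
--             layout_chars.append(pos_to_item[qwerty_pos])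
--         else:
--             layout_chars.append(' ')  # Empty position
--
--     return ''.join(layout_chars)
-- ===== SOURCE B (Python) =====
-- QWERTY_POSITIONS = "QWERTYUIOPASDFGHJKL;ZXCVBNM,./['"
--
-- def convert_to_qwerty_order(items: str, positions: str) -> str:
--     """Scatter: write each item straight into its QWERTY slot."""
--     qwerty = list(QWERTY_POSITIONS)
--     layout = [' '] * len(qwerty)
--     for pos, item in zip(positions.upper(), items.upper()):
--         if pos in qwerty:
--             layout[qwerty.index(pos)] = item
--     return ''.join(layout)
-- ===== Notes on version B (the rewrite author's own statement) =====
-- stated objective: alternative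
-- what changed: B scatters each (position, item) pair directly into a pre-allocated 32-slot buffer indexed by the position's place in QWERTY_POSITIONS, instead of first building a position-to-item dict and then gathering per QWERTY slot.
import Mathlib
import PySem

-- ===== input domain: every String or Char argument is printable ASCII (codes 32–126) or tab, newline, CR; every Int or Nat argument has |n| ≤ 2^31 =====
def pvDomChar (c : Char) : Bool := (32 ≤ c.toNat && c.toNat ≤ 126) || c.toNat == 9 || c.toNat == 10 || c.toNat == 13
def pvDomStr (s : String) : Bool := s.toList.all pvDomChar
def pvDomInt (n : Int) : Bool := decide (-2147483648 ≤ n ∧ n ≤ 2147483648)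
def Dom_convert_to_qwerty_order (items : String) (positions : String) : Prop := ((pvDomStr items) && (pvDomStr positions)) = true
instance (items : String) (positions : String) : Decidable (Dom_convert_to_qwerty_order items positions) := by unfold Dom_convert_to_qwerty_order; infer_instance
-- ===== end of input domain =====

-- B scatters each (position, item) pair straight into a 32-slot buffer indexed by the
-- position's place in QWERTY_POSITIONS, instead of A's dict-then-gather; an alternative
-- decomposition of the same cost, proved to return the same string.


-- the module constant QWERTY_POSITIONS, as a list of characters
def pvQwerty : List Char := "QWERTYUIOPASDFGHJKL;ZXCVBNM,./['".toList

-- ===== PORT A =====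
def convert_to_qwerty_order (items : String) (positions : String) : String :=
  let pos_to_item : PySem.Dict Char Char :=
    PySem.Dict.ofList (List.zip (PySem.Str.upper positions).toList (PySem.Str.upper items).toList)
  let layout_chars : List Char :=
    pvQwerty.foldl (fun acc q =>
      acc ++ [if pos_to_item.contains q then (pos_to_item.get? q).getD ' ' else ' ']) []
  String.mk layout_chars

-- ===== PORT B =====
def convert_to_qwerty_order_alt (items : String) (positions : String) : String :=
  let layout0 : List Char := List.replicate pvQwerty.length ' '
  let layout : List Char :=
    (List.zip (PySem.Str.upper positions).toList (PySem.Str.upper items).toList).foldl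
      (fun buf pi =>
        if pi.1 ∈ pvQwerty then
          match PySem.List.index? pvQwerty pi.1 with
          | some j => buf.set j pi.2
          | none => buf          -- unreachable: pos is a member
        else buf) layout0
  String.mk layout

-- ===== PRECONDITION & SPEC =====
def Spec_convert_to_qwerty_order (items : String) (positions : String) (out : String) : Prop := out = convert_to_qwerty_order_alt items positions
instance (items : String) (positions : String) (out : String) : Decidable (Spec_convert_to_qwerty_order items positions out) := by unfold Spec_convert_to_qwerty_order; infer_instance

-- ===== CLAIM (what is proved, stated in full; the proofs are below) =====
def Claim_equal_convert_to_qwerty_order : Prop := ∀ (items : String) (positions : String), Dom_convert_to_qwerty_order items positions → Spec_convert_to_qwerty_order items positions (convert_to_qwerty_order items positions)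

-- ===== LEMMAS AND PROOFS =====

lemma pvQwerty_nodup : pvQwerty.Nodup := by decide

-- Invariant: the scatter buffer always holds, at slot i, the current dict's value at
-- the i-th QWERTY position (default ' '); both loops walk the same zipped pair list.
lemma pv_inv (L : List (Char × Char)) (d : PySem.Dict Char Char) (buf : List Char)
    (hlen : buf.length = pvQwerty.length)
    (hinv : ∀ (i : Nat) (hi : i < pvQwerty.length),
      buf[i]? = some ((d.get? (pvQwerty[i])).getD ' ')) :
    (L.foldl (fun buf (pi : Char × Char) =>
        if pi.1 ∈ pvQwerty then
          match PySem.List.index? pvQwerty pi.1 with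
          | some j => buf.set j pi.2
          | none => buf
        else buf) buf).length = pvQwerty.length ∧
    ∀ (i : Nat) (hi : i < pvQwerty.length),
      (L.foldl (fun buf (pi : Char × Char) =>
        if pi.1 ∈ pvQwerty then
          match PySem.List.index? pvQwerty pi.1 with
          | some j => buf.set j pi.2
          | none => buf
        else buf) buf)[i]? =
      some (((L.foldl (fun d (pi : Char × Char) => d.insert pi.1 pi.2) d).get? (pvQwerty[i])).getD ' ') := by
  induction L generalizing d buf with
  | nil => exact ⟨hlen, hinv⟩
  | cons p t ih =>
    simp only [List.foldl_cons]
    cases hidx : PySem.List.index? pvQwerty p.1 with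
    | none =>
      have hnm : p.1 ∉ pvQwerty := (PySem.List.index?_eq_none_iff _ _).mp hidx
      rw [if_neg hnm]
      apply ih
      · exact hlen
      · intro i hi
        rw [hinv i hi, PySem.Dict.get?_insert]
        rw [if_neg]
        intro h
        exact hnm (h ▸ List.getElem_mem hi)
    | some j =>
      obtain ⟨hj, hjq, -⟩ := PySem.List.getElem_of_index?_eq_some hidx
      have hmem : p.1 ∈ pvQwerty := hjq ▸ List.getElem_mem hj
      rw [if_pos hmem]
      show (t.foldl _ (buf.set j p.2)).length = _ ∧ _
      apply ih
      · rw [List.length_set]; exact hlen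
      · intro i hi
        rw [PySem.Dict.get?_insert]
        by_cases hij : i = j
        · subst hij
          rw [List.getElem?_set_self (by omega), if_pos hjq]
          rfl
        · rw [List.getElem?_set_ne (fun h => hij h.symm), hinv i hi, if_neg]
          intro h
          exact hij (pvQwerty_nodup.getElem_inj_iff.mp (h.trans hjq.symm))

-- if the key is absent, get? is none, so the 'contains' gather equals a plain getD
lemma pv_gather (d : PySem.Dict Char Char) (q : Char) :
    (if d.contains q then (d.get? q).getD ' ' else ' ') = (d.get? q).getD ' ' := by
  by_cases h : d.contains q = true
  · rw [if_pos h]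
  · rw [if_neg h]
    have : d.get? q = none := by
      rw [PySem.Dict.contains_eq_isSome_get?] at h
      cases hg : d.get? q with
      | none => rfl
      | some v => rw [hg] at h; simp at h
    rw [this]; rfl

-- ===== VERDICT (by name: the statement is the Claim_ definition above) =====
theorem convert_to_qwerty_order_spec : Claim_equal_convert_to_qwerty_order := by
  unfold Claim_equal_convert_to_qwerty_order Spec_convert_to_qwerty_order
  intro items positions _
  simp only [convert_to_qwerty_order, convert_to_qwerty_order_alt]
  apply congrArg String.mk
  rw [PySem.List.foldl_append_singleton_eq_map, List.nil_append]
  have h0 : ∀ (i : Nat) (hi : i < pvQwerty.length),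
      (List.replicate pvQwerty.length ' ')[i]? =
        some (((PySem.Dict.empty : PySem.Dict Char Char).get? (pvQwerty[i])).getD ' ') := by
    intro i hi
    rw [List.getElem?_replicate, if_pos hi, PySem.Dict.get?_empty]
    rfl
  obtain ⟨hlen, hinv⟩ := pv_inv
    (List.zip (PySem.Str.upper positions).toList (PySem.Str.upper items).toList)
    PySem.Dict.empty (List.replicate pvQwerty.length ' ') (List.length_replicate) h0
  have hofList : ∀ (L : List (Char × Char)), (PySem.Dict.ofList L : PySem.Dict Char Char) =
      L.foldl (fun d (pi : Char × Char) => d.insert pi.1 pi.2) PySem.Dict.empty := fun _ => rfl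
  apply List.ext_getElem?
  intro i
  by_cases hi : i < pvQwerty.length
  · rw [List.getElem?_map, List.getElem?_eq_getElem hi, Option.map_some, pv_gather,
      hofList, hinv i hi]
  · rw [List.getElem?_eq_none (by rw [List.length_map]; omega),
      List.getElem?_eq_none (by rw [hlen]; omega)]
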